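-- pv_equiv track=rewrite | github.com/aeabijl/advent-of-code-2023 | day11/script2.py | map_universe
-- ===== SOURCE A (Python) =====
-- def map_universe(grid):
--     empty_rows = set()
--     empty_columns = set()
--     stars = set()
--     for y, x in enumerate(grid):
--         if len(set(x)) == 1:
--             empty_rows.add(y)
--         for index, char in enumerate(grid[y]):
--             if char == "#":
--                 stars.add((y, index))
--     for char in range(len(grid[0])):
--         if len(set([x[char] for x in grid])) == 1:
--             empty_columns.add(char)
--     return empty_rows, empty_columns, stars
-- ===== SOURCE B (Python) =====
-- def map_universe(grid):
--     first = grid[0]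
--     col_uniform = [True] * len(first)
--     empty_rows = set()
--     stars = set()
--     for y, row in enumerate(grid):
--         if len(set(row)) == 1:
--             empty_rows.add(y)
--         stars |= {(y, i) for i, ch in enumerate(row) if ch == "#"}
--         col_uniform = [ok and row[c] == first[c]
--                        for c, ok in enumerate(col_uniform)]
--     empty_columns = {c for c, ok in enumerate(col_uniform) if ok}
--     return empty_rows, empty_columns, stars
-- ===== Notes on version B (the rewrite author's own statement) =====
-- stated objective: alternative
-- what changed: Replaces A's separate second pass (which rebuilds a full column set per column) with a single pass over the grid maintaining a per-column boolean uniformity accumulator, rebuilt functionally each row; empty columns are read off the accumulator at the end.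
import Mathlib
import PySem

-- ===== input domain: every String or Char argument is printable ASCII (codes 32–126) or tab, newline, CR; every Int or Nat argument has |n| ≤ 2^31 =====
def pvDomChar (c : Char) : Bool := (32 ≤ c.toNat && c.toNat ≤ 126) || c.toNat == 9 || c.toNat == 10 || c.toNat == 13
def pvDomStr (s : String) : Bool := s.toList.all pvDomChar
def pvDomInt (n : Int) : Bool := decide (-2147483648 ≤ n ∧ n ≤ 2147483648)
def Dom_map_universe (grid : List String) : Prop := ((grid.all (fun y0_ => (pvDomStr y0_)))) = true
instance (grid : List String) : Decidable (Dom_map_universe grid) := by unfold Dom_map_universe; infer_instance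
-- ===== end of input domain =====

-- B makes one pass over the grid with a per-column boolean uniformity accumulator instead of
-- A's separate second pass that rebuilds a column set per column (objective: alternative).

-- ===== PORT A =====
-- literal port of A; `(PySem.List.pyGet? grid y).getD ""` is grid[y] (always in range under enumerate),
-- `pyGetD x.toList ch ' '` is x[char] (exact inside Pre_, where every index is in range),
-- `(grid.headI).toList.length` is len(grid[0]) (exact for grid ≠ [], which Pre_ requires).
def map_universe (grid : List String) : List Int × List Int × (List (Int × Int)) :=
  let rs : List Int × List (Int × Int) :=
    (PySem.List.enumerate grid).foldl
      (fun (st : List Int × List (Int × Int)) p =>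
        ((if (PySem.Set.ofList p.2.toList).length == 1 then PySem.Set.add st.1 p.1 else st.1),
         (PySem.List.enumerate ((PySem.List.pyGet? grid p.1).getD "").toList).foldl
           (fun s q => if q.2 == '#' then PySem.Set.add s (p.1, q.1) else s) st.2))
      ([], [])
  let ec : List Int :=
    (PySem.List.pyRange 0 ((grid.headI).toList.length : Int) 1).foldl
      (fun s ch =>
        if (PySem.Set.ofList (grid.map (fun x => PySem.List.pyGetD x.toList ch ' '))).length == 1
        then PySem.Set.add s ch else s)
      []
  (rs.1, ec, rs.2)

-- ===== PORT B =====
-- literal port of Source B; first = grid[0] appears as `.headI` (only reached on nonempty grids, which Pre_ requires),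
-- row[c]/first[c] as pyGetD (exact inside Pre_), the rebuilt per-row list comprehension as a map over enumerate.
def map_universe_alt (grid : List String) : List Int × List Int × (List (Int × Int)) :=
  let first := (grid.headI).toList
  let st : List Int × List (Int × Int) × List Bool :=
    (PySem.List.enumerate grid).foldl
      (fun (st : List Int × List (Int × Int) × List Bool) p =>
        ((if (PySem.Set.ofList p.2.toList).length == 1 then PySem.Set.add st.1 p.1 else st.1),
         (((PySem.List.enumerate p.2.toList).filter (fun q => q.2 == '#')).map
            (fun q => (p.1, q.1))).foldl PySem.Set.add st.2.1,
         (PySem.List.enumerate st.2.2).map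
           (fun q => q.2 && (PySem.List.pyGetD p.2.toList q.1 ' ' == PySem.List.pyGetD first q.1 ' '))))
      ([], [], List.replicate first.length true)
  (st.1,
   PySem.Set.ofList (((PySem.List.enumerate st.2.2).filter (fun q => q.2)).map (fun q => q.1)),
   st.2.1)

-- ===== PRECONDITION & SPEC =====
-- Pre_ excludes exactly the inputs where A raises IndexError: the empty grid (grid[0]) and
-- ragged grids with a row shorter than row 0 (x[char] in the column scan).
def Pre_map_universe (grid : List String) : Prop :=
  grid ≠ [] ∧ ∀ row ∈ grid, (grid.headI).toList.length ≤ row.toList.length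
instance (grid : List String) : Decidable (Pre_map_universe grid) := by
  unfold Pre_map_universe; infer_instance
def pvWitness_map_universe : List String := ["#.", "..", ".#"]

def Spec_map_universe (grid : List String) (out : List Int × List Int × (List (Int × Int))) : Prop :=
  out = map_universe_alt grid
instance (grid : List String) (out : List Int × List Int × (List (Int × Int))) : Decidable (Spec_map_universe grid out) := by unfold Spec_map_universe; infer_instance

-- ===== CLAIM (what is proved, stated in full; the proofs are below) =====
def Claim_equal_map_universe : Prop := ∀ (grid : List String), Dom_map_universe grid → Pre_map_universe grid → Spec_map_universe grid (map_universe grid)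

-- ===== LEMMAS AND PROOFS =====

-- a fold of a pair of independent updates splits into two folds
theorem pvFoldlPair {α β γ : Type} (f : α → β → α) (g : γ → β → γ) (l : List β) (a : α) (c : γ) :
    l.foldl (fun st p => (f st.1 p, g st.2 p)) (a, c) = (l.foldl f a, l.foldl g c) := by
  induction l generalizing a c with
  | nil => rfl
  | cons x xs ih => simpa using ih (f a x) (g c x)

-- a fold of a triple of independent updates splits into three folds
theorem pvFoldlTriple {α β γ δ : Type} (f : α → δ → α) (g : β → δ → β) (h : γ → δ → γ)
    (l : List δ) (a : α) (b : β) (c : γ) :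
    l.foldl (fun st p => (f st.1 p, g st.2.1 p, h st.2.2 p)) (a, b, c)
      = (l.foldl f a, l.foldl g b, l.foldl h c) := by
  induction l generalizing a b c with
  | nil => rfl
  | cons x xs ih => simpa using ih (f a x) (g b x) (h c x)

-- a conditional Set.add fold is the Set.add fold of the filtered/mapped list
theorem pvFoldlIfAdd {α β : Type} [BEq α] (c : β → Bool) (f : β → α) (l : List β) (acc : PySem.Set α) :
    l.foldl (fun s p => if c p then PySem.Set.add s (f p) else s) acc
      = ((l.filter c).map f).foldl PySem.Set.add acc := by
  induction l generalizing acc with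
  | nil => rfl
  | cons x xs ih =>
    by_cases h : c x = true <;> simp [h, ih]

theorem pvSetAddLenMono {α : Type} [BEq α] (l : List α) (s : PySem.Set α) :
    s.length ≤ (l.foldl PySem.Set.add s).length := by
  induction l generalizing s with
  | nil => simp
  | cons x xs ih =>
    refine le_trans ?_ (ih (PySem.Set.add s x))
    simp [PySem.Set.add]
    split <;> simp

-- len(set(l)) == 1 is "l nonempty and all elements equal its first"
theorem pvLenOne {α : Type} [BEq α] [LawfulBEq α] [Inhabited α] (l : List α) :
    ((PySem.Set.ofList l).length == 1) = (!l.isEmpty && l.all (fun c => c == l.headI)) := by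
  cases l with
  | nil => rfl
  | cons c cs =>
    simp only [List.isEmpty_cons, Bool.not_false, Bool.true_and, List.all_cons, List.headI_cons,
      beq_self_eq_true, Bool.true_and]
    rw [show PySem.Set.ofList (c :: cs) = cs.foldl PySem.Set.add [c] from rfl]
    induction cs generalizing c with
    | nil => rfl
    | cons d ds ih =>
      by_cases h : d = c
      · subst h
        simpa [PySem.Set.add, PySem.Set.contains] using ih d
      · have hlen : 2 ≤ ((ds.foldl PySem.Set.add [c, d]).length) := by
          simpa using pvSetAddLenMono ds [c, d]
        have hne : ((ds.foldl PySem.Set.add [c, d]).length == 1) = false := by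
          simp only [beq_eq_false_iff_ne, ne_eq]; omega
        simp [PySem.Set.add, PySem.Set.contains, h, hne, beq_iff_eq]

-- grid[y] under `for y, x in enumerate(grid)` is x
theorem pvEnumGet (grid : List String) (p : Int × String) (hp : p ∈ PySem.List.enumerate grid 0) :
    (PySem.List.pyGet? grid p.1).getD "" = p.2 := by
  rw [PySem.List.mem_enumerate_iff] at hp
  obtain ⟨k, hk, rfl⟩ := hp
  simp [PySem.List.pyGet?_natCast, List.getElem?_eq_getElem hk]

-- the stars accumulators of the two ports agree
theorem pvStars (grid : List String) (acc : List (Int × Int)) :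
    (PySem.List.enumerate grid).foldl
      (fun (s : List (Int × Int)) p =>
        (PySem.List.enumerate ((PySem.List.pyGet? grid p.1).getD "").toList).foldl
          (fun s q => if q.2 == '#' then PySem.Set.add s (p.1, q.1) else s) s) acc
    = (PySem.List.enumerate grid).foldl
        (fun (s : List (Int × Int)) p =>
          (((PySem.List.enumerate p.2.toList).filter (fun q => q.2 == '#')).map
            (fun q => (p.1, q.1))).foldl PySem.Set.add s) acc := by
  apply List.foldl_ext
  intro s p hp
  rw [pvEnumGet grid p hp, pvFoldlIfAdd]

-- enumerating a map of an enumeration re-exposes the indices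
theorem pvEnumMap {α β : Type} (f : Int × α → β) (l : List α) (s : Int) :
    PySem.List.enumerate ((PySem.List.enumerate l s).map f) s
      = (PySem.List.enumerate l s).map (fun q => (q.1, f q)) := by
  induction l generalizing s with
  | nil => rfl
  | cons x xs ih => simp [PySem.List.enumerate_cons, ih]

-- the per-column accumulator after folding the rows: flag c = initial flag c && all rows match at c
theorem pvColFold (P : String → Int → Bool) (l : List (Int × String)) (cu : List Bool) :
    l.foldl
      (fun (cu : List Bool) p =>
        (PySem.List.enumerate cu).map (fun q => q.2 && P p.2 q.1)) cu
    = (PySem.List.enumerate cu).map (fun q => q.2 && l.all (fun p => P p.2 q.1)) := by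
  induction l generalizing cu with
  | nil => simp [PySem.List.map_snd_enumerate]
  | cons x xs ih =>
    simp only [List.foldl_cons, ih, pvEnumMap (fun q => q.2 && P x.2 q.1) cu 0, List.map_map]
    simp [Function.comp_def, Bool.and_assoc]

-- the empty-columns result of the two ports agrees (grid nonempty, no short rows not needed here
-- beyond pyGetD totality; both sides read out-of-range cells as the default ' ')
theorem pvCols (grid : List String) (hne : grid ≠ []) :
    (PySem.List.pyRange 0 ((grid.headI).toList.length : Int) 1).foldl
      (fun s ch =>
        if (PySem.Set.ofList (grid.map (fun x => PySem.List.pyGetD x.toList ch ' '))).length == 1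
        then PySem.Set.add s ch else s)
      []
    = PySem.Set.ofList
        (((PySem.List.enumerate
            ((PySem.List.enumerate grid).foldl
              (fun (cu : List Bool) p =>
                (PySem.List.enumerate cu).map
                  (fun q => q.2 && (PySem.List.pyGetD p.2.toList q.1 ' '
                                      == PySem.List.pyGetD (grid.headI).toList q.1 ' ')))
              (List.replicate (grid.headI).toList.length true))).filter (fun q => q.2)).map
          (fun q => q.1)) := by
  rw [pvColFold (fun row c => PySem.List.pyGetD row.toList c ' '
        == PySem.List.pyGetD (grid.headI).toList c ' ')]
  rw [pvFoldlIfAdd _ (fun x => x), PySem.Set.ofList_eq_foldl]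
  congr 1
  have hrep : PySem.List.enumerate (List.replicate (grid.headI).toList.length true) 0
      = (PySem.List.pyRange 0 ((grid.headI).toList.length : Int) 1).map (fun j => (j, true)) := by
    rw [PySem.List.enumerate_eq_map_pyRange (d := true)]
    simp only [PySem.List.len, List.length_replicate]
    apply List.map_congr_left
    intro j hj
    rw [PySem.List.mem_pyRange_iff_of_pos (by norm_num)] at hj
    obtain ⟨h0, h1, -⟩ := hj
    rcases Int.eq_ofNat_of_zero_le h0 with ⟨k, rfl⟩
    rw [PySem.List.pyGetD_natCast]
    simp [List.getD]
  rw [pvEnumMap, hrep]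
  simp only [List.map_map, List.filter_map, List.map_map, Function.comp_def, Bool.true_and]
  simp only [List.map_id']
  apply List.filter_congr
  intro ch _
  rw [pvLenOne]
  have hall : ∀ (P : String → Bool), (PySem.List.enumerate grid).all (fun p => P p.2) = grid.all P := by
    intro P
    conv_rhs => rw [← PySem.List.map_snd_enumerate grid 0]
    rw [List.all_map]
    rfl
  cases grid with
  | nil => exact absurd rfl hne
  | cons g0 gs =>
    rw [hall (fun row => PySem.List.pyGetD row.toList ch ' ' == PySem.List.pyGetD ((g0 :: gs).headI).toList ch ' ')]
    simp [List.all_map, Function.comp_def]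

-- ===== VERDICT (by name: the statement is the Claim_ definition above) =====
theorem map_universe_spec : Claim_equal_map_universe := by
  intro grid _ hpre
  obtain ⟨hne, -⟩ := hpre
  unfold Spec_map_universe map_universe map_universe_alt
  dsimp only
  rw [pvFoldlPair
        (fun (s : List Int) (p : Int × String) =>
          if (PySem.Set.ofList p.2.toList).length == 1 then PySem.Set.add s p.1 else s)
        (fun (s : List (Int × Int)) (p : Int × String) =>
          (PySem.List.enumerate ((PySem.List.pyGet? grid p.1).getD "").toList).foldl
            (fun s q => if q.2 == '#' then PySem.Set.add s (p.1, q.1) else s) s),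
      pvFoldlTriple
        (fun (s : List Int) (p : Int × String) =>
          if (PySem.Set.ofList p.2.toList).length == 1 then PySem.Set.add s p.1 else s)
        (fun (s : List (Int × Int)) (p : Int × String) =>
          (((PySem.List.enumerate p.2.toList).filter (fun q => q.2 == '#')).map
            (fun q => (p.1, q.1))).foldl PySem.Set.add s)
        (fun (cu : List Bool) (p : Int × String) =>
          (PySem.List.enumerate cu).map
            (fun q => q.2 && (PySem.List.pyGetD p.2.toList q.1 ' '
                                == PySem.List.pyGetD (grid.headI).toList q.1 ' ')))]
  refine Prod.ext rfl (Prod.ext ?_ ?_) <;> dsimp only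
  · exact pvCols grid hne
  · exact pvStars grid []
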